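-- pv_equiv track=rewrite | github.com/solar3070/2022-Programmers | lev1/모의고사.py | solution
-- ===== SOURCE A (Python) =====
-- def solution(answers):
--     person1 = [1, 2, 3, 4, 5]
--     person2 = [2, 1, 2, 3, 2, 4, 2, 5]
--     person3 = [3, 3, 1, 1, 2, 2, 4, 4, 5, 5]
--     count = [0, 0, 0]
--
--     for i in range(len(answers)):
--         if answers[i] == person1[i % 5]:
--             count[0] += 1
--         if answers[i] == person2[i % 8]:
--             count[1] += 1
--         if answers[i] == person3[i % 10]:
--             count[2] += 1
--
--     return [i + 1 for i, v in enumerate(count) if v == max(count)]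
-- ===== SOURCE B (Python) =====
-- def solution(answers):
--     patterns = ([1, 2, 3, 4, 5],
--                 [2, 1, 2, 3, 2, 4, 2, 5],
--                 [3, 3, 1, 1, 2, 2, 4, 4, 5, 5])
--     # one histogram pass: occurrences of each value at each position class mod 40
--     cnt = {}
--     for i, a in enumerate(answers):
--         key = (i % 40, a)
--         cnt[key] = cnt.get(key, 0) + 1
--     counts = [sum(cnt.get((r, p[r % len(p)]), 0) for r in range(40))
--               for p in patterns]
--     best = max(counts)
--     return [k + 1 for k, c in enumerate(counts) if c == best]
-- ===== Notes on version B (the rewrite author's own statement) =====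
-- stated objective: alternative
-- what changed: Replaces A's fused per-element loop with three modulo-indexed pattern comparisons by a different data structure: one pass builds a histogram dict keyed by (index mod 40, answer value), and each pattern's score is then a 40-term dict-lookup sum over the residue classes (40 = lcm of the pattern periods 5, 8, 10).
import Mathlib
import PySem

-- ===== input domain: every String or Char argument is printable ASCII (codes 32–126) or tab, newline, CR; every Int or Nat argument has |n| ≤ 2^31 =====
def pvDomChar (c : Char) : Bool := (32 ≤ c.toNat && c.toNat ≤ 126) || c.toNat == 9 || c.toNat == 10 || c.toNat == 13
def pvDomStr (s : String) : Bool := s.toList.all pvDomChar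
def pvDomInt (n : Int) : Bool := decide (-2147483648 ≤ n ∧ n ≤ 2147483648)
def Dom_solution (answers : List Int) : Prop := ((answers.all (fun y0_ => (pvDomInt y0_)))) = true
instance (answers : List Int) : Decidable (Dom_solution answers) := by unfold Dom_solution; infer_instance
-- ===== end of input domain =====

-- B replaces A's fused per-element loop (three modulo-indexed pattern comparisons per answer)
-- by a different data structure: one histogram pass keyed by (i mod 40, value) into a dict,
-- then each pattern's score is a 40-term lookup sum — alternative algorithm, same cost.


-- ===== PORT A =====
-- loop body of A's for-loop: the three if-branches, count[k] += 1 as List.set / List.getD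
def pvAStep (answers : List Int) (c : List Int) (i : Int) : List Int :=
  let c := if PySem.List.pyGetD answers i 0 =
              PySem.List.pyGetD ([1, 2, 3, 4, 5] : List Int) (PySem.Int.mod i 5) 0
           then c.set 0 (c.getD 0 0 + 1) else c
  let c := if PySem.List.pyGetD answers i 0 =
              PySem.List.pyGetD ([2, 1, 2, 3, 2, 4, 2, 5] : List Int) (PySem.Int.mod i 8) 0
           then c.set 1 (c.getD 1 0 + 1) else c
  let c := if PySem.List.pyGetD answers i 0 =
              PySem.List.pyGetD ([3, 3, 1, 1, 2, 2, 4, 4, 5, 5] : List Int) (PySem.Int.mod i 10) 0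
           then c.set 2 (c.getD 2 0 + 1) else c
  c

def solution (answers : List Int) : List Int :=
  let count := (PySem.List.pyRange 0 answers.length 1).foldl (pvAStep answers) [0, 0, 0]
  -- max(count) on the non-empty 3-list; the comprehension as filterMap over enumerate
  let m := (PySem.List.max? count id).getD 0
  (PySem.List.enumerate count 0).filterMap (fun iv => if iv.2 = m then some (iv.1 + 1) else none)

-- ===== PORT B =====
-- B's three fixed patterns
def pvPatterns : List (List Int) :=
  [[1, 2, 3, 4, 5], [2, 1, 2, 3, 2, 4, 2, 5], [3, 3, 1, 1, 2, 2, 4, 4, 5, 5]]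

-- B's histogram loop: cnt[(i % 40, a)] = cnt.get((i % 40, a), 0) + 1
def pvHist (answers : List Int) : PySem.Dict (Int × Int) Int :=
  (PySem.List.enumerate answers 0).foldl
    (fun cnt ia =>
      let key : Int × Int := (PySem.Int.mod ia.1 40, ia.2)
      cnt.insert key (cnt.getD key 0 + 1))
    PySem.Dict.empty

-- B's score: sum(cnt.get((r, p[r % len(p)]), 0) for r in range(40))
def pvScore (answers : List Int) (p : List Int) : Int :=
  ((PySem.List.pyRange 0 40 1).map
    (fun r => (pvHist answers).getD (r, PySem.List.pyGetD p (PySem.Int.mod r (p.length : Int)) 0) 0)).sum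

def solution_alt (answers : List Int) : List Int :=
  let counts := pvPatterns.map (pvScore answers)
  let best := (PySem.List.max? counts id).getD 0
  (PySem.List.enumerate counts 0).filterMap (fun ic => if ic.2 = best then some (ic.1 + 1) else none)

-- ===== PRECONDITION & SPEC =====
def Spec_solution (answers : List Int) (out : List Int) : Prop := out = solution_alt answers
instance (answers : List Int) (out : List Int) : Decidable (Spec_solution answers out) := by unfold Spec_solution; infer_instance

-- ===== CLAIM =====
def Claim_equal_solution : Prop := ∀ (answers : List Int), Dom_solution answers → Spec_solution answers (solution answers)

-- ===== LEMMAS AND PROOFS =====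

-- index-form count: matches among the first n positions (characterisation of A's loop)
def pvM (answers pat : List Int) (n : Nat) : Int :=
  ((List.range n).map (fun k => if answers.getD k 0 = pat.getD (k % pat.length) 0 then (1 : Int) else 0)).sum

lemma pvA_fold (answers : List Int) (n : Nat) :
    (PySem.List.pyRange 0 (n : Int) 1).foldl (pvAStep answers) [0, 0, 0] =
      [pvM answers [1, 2, 3, 4, 5] n,
       pvM answers [2, 1, 2, 3, 2, 4, 2, 5] n,
       pvM answers [3, 3, 1, 1, 2, 2, 4, 4, 5, 5] n] := by
  induction n with
  | zero => simp [pvM, PySem.List.pyRange_one_eq_nil]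
  | succ n ih =>
      have hcast : ((n + 1 : Nat) : Int) = (n : Int) + 1 := by push_cast; ring
      rw [hcast, PySem.List.pyRange_one_succ_right (by positivity), List.foldl_append, ih]
      simp only [List.foldl_cons, List.foldl_nil, pvAStep, pvM, List.range_succ, List.map_append,
        List.sum_append, List.map_cons, List.map_nil, List.sum_cons, List.sum_nil,
        List.length_cons, List.length_nil, PySem.List.pyGetD_natCast, PySem.Int.mod_eq_emod_of_pos (by norm_num : (0:Int) < 5),
        PySem.Int.mod_eq_emod_of_pos (by norm_num : (0:Int) < 8),
        PySem.Int.mod_eq_emod_of_pos (by norm_num : (0:Int) < 10)]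
      have h5 : ((n : Int) % 5) = ((n % 5 : Nat) : Int) := by push_cast; ring
      have h8 : ((n : Int) % 8) = ((n % 8 : Nat) : Int) := by push_cast; ring
      have h10 : ((n : Int) % 10) = ((n % 10 : Nat) : Int) := by push_cast; ring
      rw [h5, h8, h10]
      simp only [PySem.List.pyGetD_natCast]
      split_ifs <;> simp

-- B's histogram keys: (i % 40, answers[i]) in index order
def pvKeys (answers : List Int) : List (Int × Int) :=
  (PySem.List.enumerate answers 0).map (fun ia => (PySem.Int.mod ia.1 40, ia.2))

lemma pvHist_eq_counter (answers : List Int) :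
    pvHist answers = PySem.Dict.counter (pvKeys answers) := by
  rw [← PySem.Dict.foldl_insert_getD_add_one_eq_counter, pvKeys, List.foldl_map]
  rfl

lemma pvEnumApp {α : Type} (xs : List α) (x : α) : ∀ (s : Int),
    PySem.List.enumerate (xs ++ [x]) s = PySem.List.enumerate xs s ++ [(s + (xs.length : Int), x)] := by
  induction xs with
  | nil => intro s; simp [PySem.List.enumerate]
  | cons y t ih => intro s; simp [PySem.List.enumerate, ih (s + 1)]; ring

lemma pvKeysApp (xs : List Int) (x : Int) :
    pvKeys (xs ++ [x]) = pvKeys xs ++ [(((xs.length % 40 : Nat) : Int), x)] := by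
  simp [pvKeys, pvEnumApp xs x 0]

-- a sum over range n with a single possible hit
lemma pvSumSingle (f : Nat → Int) : ∀ (n k : Nat), k < n →
    ((List.range n).map (fun r => if r = k then f r else 0)).sum = f k := by
  intro n
  induction n with
  | zero => intro k hk; omega
  | succ n ih =>
      intro k hk
      rw [List.range_succ, List.map_append, List.sum_append]
      by_cases h : k = n
      · subst h
        have : ((List.range k).map (fun r => if r = k then f r else 0)).sum = 0 := by
          apply List.sum_eq_zero; intro y hy; simp only [List.mem_map, List.mem_range] at hy
          obtain ⟨r, hr, hry⟩ := hy; rw [if_neg (by omega)] at hry; omega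
        simp [this]
      · rw [ih k (by omega)]
        have h' : ¬ (n = k) := fun hh => h hh.symm
        simp [h']

lemma pvScore_eq (answers p : List Int) (hd : p.length ∣ 40) :
    pvScore answers p = pvM answers p answers.length := by
  have hform : pvScore answers p =
      ((List.range 40).map
        (fun (k : Nat) => ((pvKeys answers).count (((k : Nat) : Int), p.getD (k % p.length) 0) : Int))).sum := by
    have h40 : (40 : Int) = ((40 : Nat) : Int) := by norm_num
    rw [pvScore, h40, PySem.List.pyRange_zero_natCast, List.map_map]
    refine congrArg List.sum (List.map_congr_left ?_)
    intro k _
    simp only [Function.comp_apply]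
    rw [pvHist_eq_counter, PySem.Int.mod_natCast, PySem.List.pyGetD_natCast,
      PySem.Dict.getD_counter]
  rw [hform]
  clear hform
  induction answers using List.reverseRecOn with
  | nil => simp [pvKeys, pvM, PySem.List.enumerate]
  | append_singleton xs x ih =>
      rw [pvKeysApp]
      have hsplit : ∀ k : Nat,
          ((pvKeys xs ++ [(((xs.length % 40 : Nat) : Int), x)]).count
              ((k : Int), p.getD (k % p.length) 0) : Int) =
            ((pvKeys xs).count ((k : Int), p.getD (k % p.length) 0) : Int) +
            (if k = xs.length % 40 ∧ x = p.getD (k % p.length) 0 then 1 else 0) := by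
        intro k
        rw [List.count_append, List.count_singleton]
        push_cast
        congr 1
        by_cases h1 : k = xs.length % 40
        · by_cases h2 : x = p.getD (k % p.length) 0
          · subst h1; subst h2; simp
          · rw [if_neg (by simp only [beq_iff_eq, Prod.mk.injEq, not_and]; exact fun _ => h2),
                if_neg (by tauto)]
        · rw [if_neg, if_neg (by tauto)]
          simp only [beq_iff_eq, Prod.mk.injEq, not_and]
          intro hc; exfalso; apply h1; exact_mod_cast hc.symm
      rw [List.map_congr_left (fun k _ => hsplit k), PySem.List.sum_map_add_int, ih]
      have hhit : ((List.range 40).map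
          (fun k => if k = xs.length % 40 ∧ x = p.getD (k % p.length) 0 then (1:Int) else 0)).sum =
          (if x = p.getD (xs.length % p.length) 0 then (1:Int) else 0) := by
        have h0 := pvSumSingle (fun r => if x = p.getD (r % p.length) 0 then (1:Int) else 0)
          40 (xs.length % 40) (Nat.mod_lt _ (by norm_num))
        beta_reduce at h0
        have hmm : xs.length % 40 % p.length = xs.length % p.length := Nat.mod_mod_of_dvd _ hd
        rw [← hmm, ← h0]
        refine congrArg List.sum (List.map_congr_left ?_)
        intro k _
        by_cases h1 : k = xs.length % 40 <;> simp [h1]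
      rw [hhit, pvM, pvM, List.length_append, List.length_singleton, List.range_succ,
        List.map_append, List.sum_append]
      congr 1
      · refine congrArg List.sum (List.map_congr_left ?_)
        intro k hk
        rw [List.mem_range] at hk
        simp [List.getD_eq_getElem?_getD, List.getElem?_append_left hk]
      · simp [List.getD_eq_getElem?_getD]

-- ===== VERDICT =====
theorem solution_spec : Claim_equal_solution := by
  intro answers _
  unfold Spec_solution solution solution_alt
  rw [pvA_fold answers answers.length]
  rw [show pvPatterns.map (pvScore answers) =
      [pvScore answers [1,2,3,4,5], pvScore answers [2,1,2,3,2,4,2,5],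
       pvScore answers [3,3,1,1,2,2,4,4,5,5]] from rfl]
  rw [pvScore_eq answers [1,2,3,4,5] (by norm_num),
      pvScore_eq answers [2,1,2,3,2,4,2,5] (by norm_num),
      pvScore_eq answers [3,3,1,1,2,2,4,4,5,5] (by norm_num)]
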